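-- pv_equiv track=rewrite | github.com/noaakayad/Python-Programs | args and kwargs 2.py | count_the_password
-- ===== SOURCE A (Python) =====
-- def count_the_password(lst, password):
--     """
--     ##############################################################
--     # If 'lst' is empty then I return 0
--
--     Else, if the first element of lst is equal to 'password' then I return
--     1 + the result of the function applied on lst without its first element.
--     else, I return the result of the function applied on lst without its first
--     element#
--     ##############################################################
--
--     >>> count_the_password(["cooldragon", "dragon", "gold"], "dragon")
--     1
--     >>> count_the_password(["DRAGON", "dragon!!"], "dragon")
--     0
--     >>> count_the_password([], "dragon")
--     0
--     >>> count_the_password(["dragon "], "dragon")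
--     0
--     >>> count_the_password(["dragon", "likes", "recursions", "right", \
-- "dragon", "?"], "dragon")
--     2
--
--     # Add AT LEAST 3 doctests below, DO NOT delete this line
--     >>> count_the_password(["dragon", "dragon", "dragon"], "dragon")
--     3
--     >>> count_the_password(["Dragon", "dragon", "DRAGON"], "dragon")
--     1
--     >>> count_the_password(["no", "matches", "here"], "dragon")
--     0
--     """
--     # YOUR CODE GOES HERE #
--     if lst == [] :
--         return 0
--     else :
--         if lst[0] == password :
--             return 1 + count_the_password(lst[1:], password)
--         else :
--             return count_the_password(lst[1:], password)
-- ===== SOURCE B (Python) =====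
-- def count_the_password(lst, password):
--     count = 0
--     for x in lst:
--         if x == password:
--             count += 1
--     return count
-- ===== Notes on version B (the rewrite author's own statement) =====
-- stated objective: simpler
-- what changed: Replaced the recursion on tail slices by a single iterative loop with an accumulator.
import Mathlib
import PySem

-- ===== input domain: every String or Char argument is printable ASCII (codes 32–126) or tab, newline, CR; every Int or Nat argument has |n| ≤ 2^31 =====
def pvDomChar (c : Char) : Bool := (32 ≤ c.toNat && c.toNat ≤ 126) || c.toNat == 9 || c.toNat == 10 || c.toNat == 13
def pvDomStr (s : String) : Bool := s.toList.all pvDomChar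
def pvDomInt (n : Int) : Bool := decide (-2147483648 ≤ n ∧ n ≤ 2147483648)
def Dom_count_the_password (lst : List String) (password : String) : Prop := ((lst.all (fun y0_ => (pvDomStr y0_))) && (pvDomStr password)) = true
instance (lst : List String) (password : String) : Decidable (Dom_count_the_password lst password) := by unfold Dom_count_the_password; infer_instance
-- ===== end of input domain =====

-- B replaces A's recursion on tail slices with one iterative accumulator loop (simpler).

-- ===== PORT A =====
-- literal transliteration of A: empty check, head comparison, recursion on lst[1:]
def count_the_password (lst : List String) (password : String) : Int :=
  if lst = [] then 0
  else
    if PySem.List.pyGetD lst 0 "" = password then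
      1 + count_the_password (PySem.List.slice lst (some 1) none) password
    else
      count_the_password (PySem.List.slice lst (some 1) none) password
termination_by lst.length
decreasing_by
  all_goals
    cases lst with
    | nil => simp_all
    | cons a t => simp [PySem.List.slice_from_one]

-- ===== PORT B =====
-- literal transliteration of B: foldl over the list with an accumulator count
def count_the_password_alt (lst : List String) (password : String) : Int :=
  lst.foldl (fun count x => if x = password then count + 1 else count) 0

-- ===== PRECONDITION & SPEC =====
def Spec_count_the_password (lst : List String) (password : String) (out : Int) : Prop := out = count_the_password_alt lst password
instance (lst : List String) (password : String) (out : Int) : Decidable (Spec_count_the_password lst password out) := by unfold Spec_count_the_password; infer_instance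

-- ===== CLAIM (what is proved, stated in full; the proofs are below) =====
def Claim_equal_count_the_password : Prop := ∀ (lst : List String) (password : String), Dom_count_the_password lst password → Spec_count_the_password lst password (count_the_password lst password)

-- ===== LEMMAS AND PROOFS =====
theorem fold_init (t : List String) (p : String) (c : Int) :
    t.foldl (fun count x => if x = p then count + 1 else count) c =
      c + t.foldl (fun count x => if x = p then count + 1 else count) 0 := by
  induction t generalizing c with
  | nil => simp
  | cons b t ih =>
    simp only [List.foldl_cons]
    rw [ih, ih (if b = p then 0 + 1 else 0)]
    split_ifs <;> omega

theorem alt_cons (a : String) (t : List String) (p : String) :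
    count_the_password_alt (a :: t) p =
      (if a = p then 1 else 0) + count_the_password_alt t p := by
  unfold count_the_password_alt
  simp only [List.foldl_cons]
  rw [fold_init]
  split_ifs <;> omega

theorem a_eq_b (lst : List String) (password : String) :
    count_the_password lst password = count_the_password_alt lst password := by
  induction lst with
  | nil => simp [count_the_password, count_the_password_alt]
  | cons a t ih =>
    rw [count_the_password, alt_cons]
    simp only [PySem.List.pyGetD, PySem.List.pyGet?, PySem.List.pyIdx?]
    have hs : PySem.List.slice (a :: t) (some 1) none = t := by
      simp [PySem.List.slice_from_one]
    split_ifs with h1 h2 h2 <;> simp_all [hs] <;> omega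

-- ===== VERDICT (by name: the statement is the Claim_ definition above) =====
theorem count_the_password_spec : Claim_equal_count_the_password := by
  intro lst password _
  unfold Spec_count_the_password
  exact a_eq_b lst password
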